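-- pv_equiv track=rewrite | github.com/UWPCE-PythonCert-ClassRepos/SP_Online_PY210 | students/chris_lombardi/Lesson04/trigrams.py | build_trigram
-- ===== SOURCE A (Python) =====
-- import string
--
-- def build_trigram(words):
--     """Build a trigram association from a list of words and return
--     the trigram association as a dictionary"""
--     trigrams = {}
--
--     for i in range(len(words) - 2):
--         pair = words[i:i + 2]
--         trunc_pair = [remove_punctuation(pair[0]), remove_punctuation(pair[1])]
--         follower = words[i + 2]
--         trunc_follower = remove_punctuation(follower)
--         key_pair = (trunc_pair[0], trunc_pair[1])
--
--         trigrams.setdefault(key_pair,[])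
--         trigrams[key_pair].append(trunc_follower)
--
--     return trigrams
--
-- def remove_punctuation(str1):
--     """Remove punctuation from a string"""
--     str2 = ''
--     for ch in str1:
--         if ch not in string.punctuation:
--             str2 += ch
--     return str2
-- ===== SOURCE B (Python) =====
-- import string
--
-- def build_trigram(words):
--     """Build a trigram association from a list of words and return
--     the trigram association as a dictionary"""
--     cleaned = [remove_punctuation(w) for w in words]
--     assoc = [((cleaned[i], cleaned[i + 1]), cleaned[i + 2])
--              for i in range(len(cleaned) - 2)]
--     keys = []
--     for k, _ in assoc:
--         if k not in keys:
--             keys.append(k)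
--     return {k: [f for p, f in assoc if p == k] for k in keys}
--
-- def remove_punctuation(str1):
--     """Remove punctuation from a string"""
--     return ''.join(ch for ch in str1 if ch not in string.punctuation)
-- ===== Notes on version B (the rewrite author's own statement) =====
-- stated objective: alternative
-- what changed: B never maintains an incremental dict: it builds one association list of (pair, follower) entries, collects the distinct pairs in first-occurrence order, and then forms each dict value by filtering the association list per key, instead of A's windowed setdefault/append dict accumulation.
import Mathlib
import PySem

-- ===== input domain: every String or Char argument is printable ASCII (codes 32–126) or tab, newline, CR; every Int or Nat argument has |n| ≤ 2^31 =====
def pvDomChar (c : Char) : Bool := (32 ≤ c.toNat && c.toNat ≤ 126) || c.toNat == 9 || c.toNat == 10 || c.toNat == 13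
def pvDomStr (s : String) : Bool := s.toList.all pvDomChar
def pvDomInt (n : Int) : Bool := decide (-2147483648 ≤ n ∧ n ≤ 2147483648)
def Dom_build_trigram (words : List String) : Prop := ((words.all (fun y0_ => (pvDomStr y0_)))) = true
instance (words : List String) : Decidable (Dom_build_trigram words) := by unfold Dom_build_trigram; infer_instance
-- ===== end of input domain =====

-- B replaces A's incremental setdefault/append dict with a group-by: one association
-- list of (pair, follower) entries, distinct keys in first-occurrence order, values by
-- per-key filtering; objective: alternative (not faster).

-- ===== PORT A =====
-- string.punctuation
def pyPunctuation : List Char := "!\"#$%&'()*+,-./:;<=>?@[\\]^_`{|}~".toList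

-- A builds str2 += ch; ported on List Char (Lean's own String.append is opaque; exact, same chars)
def remove_punctuation (str1 : String) : String :=
  String.ofList (str1.toList.foldl
    (fun str2 ch => if !(pyPunctuation.contains ch) then str2 ++ [ch] else str2) [])

-- the pyGetD defaults "" are never used: every index is in range for i ∈ range(len(words)-2)
def build_trigram (words : List String) : List (String × String × List String) :=
  ((PySem.List.pyRange 0 ((words.length : Int) - 2) 1).foldl
    (fun trigrams i =>
      let pair := PySem.List.slice words (some i) (some (i + 2))
      let trunc_pair := [remove_punctuation (PySem.List.pyGetD pair 0 ""),
                         remove_punctuation (PySem.List.pyGetD pair 1 "")]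
      let follower := PySem.List.pyGetD words (i + 2) ""
      let trunc_follower := remove_punctuation follower
      let key_pair := (PySem.List.pyGetD trunc_pair 0 "", PySem.List.pyGetD trunc_pair 1 "")
      let d := trigrams.setdefault key_pair []
      d.insert key_pair (d.getD key_pair [] ++ [trunc_follower]))
    (PySem.Dict.empty : PySem.Dict (String × String) (List String))).items.map (fun p => (p.1.1, p.1.2, p.2))

-- ===== PORT B =====
def remove_punctuation_alt (str1 : String) : String :=
  String.ofList (str1.toList.filter (fun ch => !(pyPunctuation.contains ch)))

def build_trigram_alt (words : List String) : List (String × String × List String) :=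
  let cleaned := words.map remove_punctuation_alt
  let assoc := (PySem.List.pyRange 0 ((cleaned.length : Int) - 2) 1).map
    (fun i => ((PySem.List.pyGetD cleaned i "", PySem.List.pyGetD cleaned (i + 1) ""),
               PySem.List.pyGetD cleaned (i + 2) ""))
  let keys := assoc.foldl (fun ks p => PySem.Set.add ks p.1) []
  keys.map (fun k => (k.1, k.2, (assoc.filter (fun p => p.1 == k)).map (·.2)))

-- ===== PRECONDITION & SPEC =====
def Spec_build_trigram (words : List String) (out : List (String × String × List String)) : Prop := out = build_trigram_alt words
instance (words : List String) (out : List (String × String × List String)) : Decidable (Spec_build_trigram words out) := by unfold Spec_build_trigram; infer_instance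

-- ===== CLAIM (what is proved, stated in full; the proofs are below) =====
def Claim_equal_build_trigram : Prop := ∀ (words : List String), Dom_build_trigram words → Spec_build_trigram words (build_trigram words)

-- ===== LEMMAS AND PROOFS =====

theorem rp_eq (s : String) : remove_punctuation s = remove_punctuation_alt s := by
  unfold remove_punctuation remove_punctuation_alt
  rw [PySem.List.foldl_append_if_eq_filter]
  simp

theorem drop_take_two (xs : List String) (k : Nat) (h : k + 2 ≤ xs.length) :
    (xs.drop k).take 2 = [xs.getD k "", xs.getD (k + 1) ""] := by
  apply List.ext_getElem
  · simp; omega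
  · intro i h1 h2
    have h2' : i < 2 := by simpa using h2
    interval_cases i <;>
      simp [List.getD_eq_getElem?_getD,
        (by omega : k < xs.length), (by omega : k + 1 < xs.length)]

theorem getD_map_rp (xs : List String) (j : Nat) (h : j < xs.length) :
    (xs.map remove_punctuation_alt).getD j "" = remove_punctuation_alt (xs.getD j "") := by
  simp [List.getD_eq_getElem?_getD, h]

-- A's per-step setdefault-then-append is a single modify
theorem step_eq_modify (d : PySem.Dict (String × String) (List String))
    (k : String × String) (f : String) :
    ((d.setdefault k []).insert k ((d.setdefault k []).getD k [] ++ [f]))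
      = d.modify k [] (· ++ [f]) := by
  by_cases h : d.contains k = true
  · rw [PySem.Dict.setdefault_of_contains d _ h]
    rfl
  · rw [PySem.Dict.setdefault_of_not_contains d _ (by simpa using h)]
    rw [PySem.Dict.insert_insert_self]
    simp only [PySem.Dict.getD_insert_self]
    show d.insert k ([] ++ [f]) = d.insert k (d.getD k [] ++ [f])
    rw [PySem.Dict.getD_of_not_contains (h := by simpa using h)]

-- B's association entry for window start i (the function B maps over the range)
def bentry (words : List String) (i : Int) : (String × String) × String :=
  ((PySem.List.pyGetD (words.map remove_punctuation_alt) i "",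
    PySem.List.pyGetD (words.map remove_punctuation_alt) (i + 1) ""),
   PySem.List.pyGetD (words.map remove_punctuation_alt) (i + 2) "")

-- A's per-window key/follower coincide with B's cleaned-table entry
theorem entry_eq (words : List String) (i : Int)
    (h0 : 0 ≤ i) (h2 : i + 2 < (words.length : Int)) :
    ((remove_punctuation (PySem.List.pyGetD (PySem.List.slice words (some i) (some (i + 2))) 0 ""),
      remove_punctuation (PySem.List.pyGetD (PySem.List.slice words (some i) (some (i + 2))) 1 "")),
     remove_punctuation (PySem.List.pyGetD words (i + 2) "")) = bentry words i := by
  obtain ⟨k, rfl⟩ : ∃ k : Nat, (k : Int) = i := ⟨i.toNat, by omega⟩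
  have hk2 : k + 2 ≤ words.length := by exact_mod_cast (by omega : (k:Int) + 2 ≤ words.length)
  have hc : ((k : Int) + 2) = (((k + 2 : Nat) : Int)) := by push_cast; ring
  have hc1 : ((k : Int) + 1) = (((k + 1 : Nat) : Int)) := by push_cast; ring
  unfold bentry
  rw [hc, hc1, PySem.List.slice_natCast]
  have h22 : k + 2 - k = 2 := by omega
  rw [h22, drop_take_two words k hk2]
  simp only [PySem.List.pyGetD_natCast]
  have hb0 : k < words.length := by omega
  have hb1 : k + 1 < words.length := by omega
  have hb2 : k + 2 < words.length := by omega
  rw [getD_map_rp words k hb0, getD_map_rp words (k+1) hb1, getD_map_rp words (k+2) hb2]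
  simp [PySem.List.pyGetD, PySem.List.pyGet?, PySem.List.pyIdx?, rp_eq]

-- ===== VERDICT (by name: the statement is the Claim_ definition above) =====
theorem build_trigram_spec : Claim_equal_build_trigram := by
  unfold Claim_equal_build_trigram
  intro words _
  unfold Spec_build_trigram build_trigram build_trigram_alt
  dsimp only
  simp only [List.length_map]
  have hcong : (PySem.List.pyRange 0 ((words.length : Int) - 2) 1).foldl
      (fun (trigrams : PySem.Dict (String × String) (List String)) (i : Int) =>
        let pair := PySem.List.slice words (some i) (some (i + 2))
        let trunc_pair := [remove_punctuation (PySem.List.pyGetD pair 0 ""),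
                           remove_punctuation (PySem.List.pyGetD pair 1 "")]
        let follower := PySem.List.pyGetD words (i + 2) ""
        let trunc_follower := remove_punctuation follower
        let key_pair := (PySem.List.pyGetD trunc_pair 0 "", PySem.List.pyGetD trunc_pair 1 "")
        let d := trigrams.setdefault key_pair []
        d.insert key_pair (d.getD key_pair [] ++ [trunc_follower])) PySem.Dict.empty
    = ((PySem.List.pyRange 0 ((words.length : Int) - 2) 1).map (bentry words)).foldl
      (fun d p => d.modify p.1 [] (· ++ [p.2])) PySem.Dict.empty := by
    rw [List.foldl_map]
    apply PySem.List.foldl_congr_mem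
    intro acc i hi
    have hb : 0 ≤ i ∧ i + 2 < (words.length : Int) := by
      rw [PySem.List.pyRange_one] at hi
      obtain ⟨k, hk, rfl⟩ := List.mem_map.mp hi
      have := List.mem_range.mp hk
      omega
    simp only [PySem.List.pyGetD, PySem.List.pyGet?, PySem.List.pyIdx?]
    rw [step_eq_modify]
    rw [← entry_eq words i hb.1 hb.2]
    simp [PySem.List.pyGetD, PySem.List.pyGet?, PySem.List.pyIdx?]
  rw [hcong]
  have hnd := PySem.Dict.nodup_keys_foldl_modify_key
    ((PySem.List.pyRange 0 ((words.length : Int) - 2) 1).map (bentry words)) Prod.fst []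
    (fun _ p => (· ++ [p.2])) PySem.Dict.empty (by simp)
  rw [PySem.Dict.items_eq_map_keys _ hnd []]
  rw [PySem.Dict.keys_foldl_modify_key _ Prod.fst [] (fun _ p => (· ++ [p.2])) PySem.Dict.empty]
  rw [← PySem.Set.update_map_eq_foldl_add _ Prod.fst ([] : PySem.Set (String × String))]
  rw [List.map_map]
  apply List.map_congr_left
  intro k hk
  simp only [Function.comp]
  rw [PySem.Dict.getD_foldl_modify_append]
  simp only [PySem.Dict.getD_empty, List.nil_append]
  rfl
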